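-- pv_equiv track=rewrite | github.com/atakanelik34/Agentic-AI-Developer-Advocate | skills/contract.py | _extract_block_after_heading
-- ===== SOURCE A (Python) =====
-- def _extract_block_after_heading(section: str, heading: str) -> str:
--     start = section.find(heading)
--     if start < 0:
--         return ""
--
--     after = section[start + len(heading) :]
--     lines: list[str] = []
--     for line in after.splitlines():
--         stripped = line.strip()
--         if not stripped:
--             if lines:
--                 break
--             continue
--         if stripped.startswith("## "):
--             break
--         lines.append(line)
--     return "\n".join(lines)
-- ===== SOURCE B (Python) =====
-- def _extract_block_after_heading(section: str, heading: str) -> str: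
--     start = section.find(heading)
--     if start < 0:
--         return ""
--     return _block(section[start + len(heading):].splitlines())
--
--
-- def _block(lines):
--     """Skip leading blank lines recursively, then build the block string."""
--     if not lines:
--         return ""
--     stripped = lines[0].strip()
--     if not stripped:
--         return _block(lines[1:])
--     if stripped.startswith("## "):
--         return ""
--     tail = _take(lines[1:])
--     return lines[0] if not tail else lines[0] + "\n" + tail
--
--
-- def _take(lines):
--     """Recursively build 'line\\n...' until a blank line or a '## ' heading."""
--     if not lines:
--         return ""
--     stripped = lines[0].strip()
--     if not stripped or stripped.startswith("## "):
--         return ""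
--     tail = _take(lines[1:])
--     return lines[0] if not tail else lines[0] + "\n" + tail
-- ===== Notes on version B (the rewrite author's own statement) =====
-- stated objective: alternative
-- what changed: Replaced A's single iterative accumulator loop (break/continue controlled by a lines-nonempty flag, then '\n'.join of the collected list) by two mutually-plain recursive functions that build the result string directly back-to-front: _block recursively skips leading blank lines, _take recursively concatenates line + '\n' + tail until a blank or '## ' line; no list accumulator and no join.
import Mathlib
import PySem

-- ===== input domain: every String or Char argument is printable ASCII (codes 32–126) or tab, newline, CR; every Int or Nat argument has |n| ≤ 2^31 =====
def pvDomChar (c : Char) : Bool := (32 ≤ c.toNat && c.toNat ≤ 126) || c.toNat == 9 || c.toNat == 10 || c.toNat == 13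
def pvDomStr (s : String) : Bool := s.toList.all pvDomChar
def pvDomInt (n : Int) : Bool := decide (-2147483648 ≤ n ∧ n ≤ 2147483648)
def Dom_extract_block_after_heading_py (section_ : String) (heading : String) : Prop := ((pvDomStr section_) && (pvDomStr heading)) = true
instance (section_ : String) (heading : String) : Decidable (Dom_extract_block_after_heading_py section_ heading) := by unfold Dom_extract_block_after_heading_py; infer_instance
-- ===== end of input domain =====

-- B replaces A's single stateful accumulator loop (break/continue driven by a
-- lines-nonempty flag, then '\n'.join) by structural recursion that builds the
-- result STRING directly back-to-front (no line list, no join); alternative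
-- decomposition, same cost.

-- ===== PORT A =====
-- A's for-loop with break/continue as structural recursion over the line list,
-- carrying the accumulated `lines` list.
def pvALoop : List String → List String → List String
  | [], acc => acc
  | l :: rest, acc =>
    let stripped := PySem.Str.strip l
    if stripped = "" then
      if acc ≠ [] then acc else pvALoop rest acc
    else if PySem.Str.startswith stripped "## " then acc
    else pvALoop rest (acc ++ [l])

def extract_block_after_heading_py (section_ : String) (heading : String) : String :=
  let start := PySem.Str.find section_ heading
  if start < 0 then ""
  else
    let after := PySem.Str.slice section_ (some (start + PySem.Str.len heading)) none
    PySem.Str.join "\n" (pvALoop (PySem.Str.splitlines after) [])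

-- ===== PORT B =====
-- _take(lines): recursively build 'line\n…' until a blank line or a '## ' heading
def pvTake : List String → String
  | [] => ""
  | l :: rest =>
    let stripped := PySem.Str.strip l
    if stripped = "" ∨ PySem.Str.startswith stripped "## " then ""
    else
      let tail := pvTake rest
      if tail = "" then l else l ++ "\n" ++ tail

-- _block(lines): skip leading blank lines recursively, then build the block string
def pvBlock : List String → String
  | [] => ""
  | l :: rest =>
    let stripped := PySem.Str.strip l
    if stripped = "" then pvBlock rest
    else if PySem.Str.startswith stripped "## " then ""
    else
      let tail := pvTake rest
      if tail = "" then l else l ++ "\n" ++ tail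

def extract_block_after_heading_py_alt (section_ : String) (heading : String) : String :=
  let start := PySem.Str.find section_ heading
  if start < 0 then ""
  else pvBlock (PySem.Str.splitlines (PySem.Str.slice section_ (some (start + PySem.Str.len heading)) none))

-- ===== PRECONDITION & SPEC =====
def Spec_extract_block_after_heading_py (section_ : String) (heading : String) (out : String) : Prop := out = extract_block_after_heading_py_alt section_ heading
instance (section_ : String) (heading : String) (out : String) : Decidable (Spec_extract_block_after_heading_py section_ heading out) := by unfold Spec_extract_block_after_heading_py; infer_instance

-- ===== CLAIM (what is proved, stated in full; the proofs are below) =====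
def Claim_equal_extract_block_after_heading_py : Prop := ∀ (section_ : String) (heading : String), Dom_extract_block_after_heading_py section_ heading → Spec_extract_block_after_heading_py section_ heading (extract_block_after_heading_py section_ heading)

-- ===== LEMMAS AND PROOFS =====

def pvBlank (l : String) : Bool := PySem.Str.strip l = ""
def pvKeep (l : String) : Bool := !(pvBlank l) && !(PySem.Str.startswith (PySem.Str.strip l) "## ")

theorem pvKeep_false_of_blank (l : String) (hb : PySem.Str.strip l = "") : pvKeep l = false := by
  simp [pvKeep, pvBlank, hb]

theorem pvKeep_false_of_hash (l : String) (hs : PySem.Str.startswith (PySem.Str.strip l) "## " = true) :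
    pvKeep l = false := by
  simp only [pvKeep, pvBlank, hs, Bool.not_true, Bool.and_false]

theorem pvKeep_true (l : String) (hb : ¬ PySem.Str.strip l = "")
    (hs : ¬ PySem.Str.startswith (PySem.Str.strip l) "## " = true) : pvKeep l = true := by
  unfold pvKeep pvBlank
  rw [decide_eq_false hb, Bool.eq_false_iff.mpr hs]
  rfl

-- A's loop characterised as takeWhile/dropWhile
theorem pvALoop_ne_nil (rest : List String) (acc : List String) (h : acc ≠ []) :
    pvALoop rest acc = acc ++ rest.takeWhile pvKeep := by
  induction rest generalizing acc with
  | nil => simp [pvALoop]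
  | cons l t ih =>
    rw [pvALoop, List.takeWhile_cons]
    by_cases hb : PySem.Str.strip l = ""
    · rw [if_pos hb, if_pos h, pvKeep_false_of_blank l hb]
      simp
    · rw [if_neg hb]
      by_cases hs : PySem.Str.startswith (PySem.Str.strip l) "## " = true
      · rw [if_pos hs, pvKeep_false_of_hash l hs]
        simp
      · rw [if_neg hs, ih _ (by simp), pvKeep_true l hb hs]
        simp

theorem pvALoop_nil (lines : List String) :
    pvALoop lines [] = (lines.dropWhile pvBlank).takeWhile pvKeep := by
  induction lines with
  | nil => simp [pvALoop]
  | cons l t ih =>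
    rw [pvALoop, List.dropWhile_cons]
    by_cases hb : PySem.Str.strip l = ""
    · have : pvBlank l = true := by simp [pvBlank, hb]
      rw [if_pos hb, this]
      simpa using ih
    · have hbl : pvBlank l = false := by simp [pvBlank, hb]
      rw [if_neg hb, hbl]
      simp only [Bool.false_eq_true, if_false, List.takeWhile_cons]
      by_cases hs : PySem.Str.startswith (PySem.Str.strip l) "## " = true
      · rw [if_pos hs, pvKeep_false_of_hash l hs]
        simp
      · rw [if_neg hs]
        simp only [List.nil_append]
        rw [pvALoop_ne_nil t [l] (by simp), pvKeep_true l hb hs]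
        simp

-- join facts at the string level
theorem pvJoin_cons (a : String) (t : List String) :
    PySem.Str.join "\n" (a :: t) = if t = [] then a else a ++ "\n" ++ PySem.Str.join "\n" t := by
  cases t with
  | nil =>
    apply String.ext
    simp [PySem.Str.toList_join, PySem.Chars.join_singleton]
  | cons b t =>
    apply String.ext
    simp [PySem.Str.toList_join, PySem.Chars.join_cons_cons]

theorem pvNe_empty_of_keep (l : String) (h : pvKeep l = true) : l ≠ "" := by
  intro he
  subst he
  simp [pvKeep, pvBlank] at h
  exact h.1 rfl

theorem pvJoin_eq_empty_iff (L : List String) (h : ∀ x ∈ L, x ≠ "") :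
    (PySem.Str.join "\n" L = "" ↔ L = []) := by
  cases L with
  | nil => decide
  | cons a t =>
    rw [pvJoin_cons]
    constructor
    · intro he
      by_cases ht : t = []
      · rw [if_pos ht] at he
        exact absurd he (h a (by simp))
      · rw [if_neg ht] at he
        have : (a ++ "\n" ++ PySem.Str.join "\n" t).toList = "".toList := by rw [he]
        simp at this
    · intro hc
      simp at hc

theorem pvTake_eq_join (lines : List String) :
    pvTake lines = PySem.Str.join "\n" (lines.takeWhile pvKeep) := by
  induction lines with
  | nil => simp [pvTake, PySem.Str.join, PySem.Chars.join, List.intercalate]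
  | cons l rest ih =>
    rw [pvTake, List.takeWhile_cons]
    by_cases hb : PySem.Str.strip l = ""
    · rw [if_pos (Or.inl hb), pvKeep_false_of_blank l hb]
      simp [PySem.Str.join, PySem.Chars.join, List.intercalate]
    · by_cases hs : PySem.Str.startswith (PySem.Str.strip l) "## " = true
      · rw [if_pos (Or.inr hs), pvKeep_false_of_hash l hs]
        simp [PySem.Str.join, PySem.Chars.join, List.intercalate]
      · rw [if_neg (by tauto), pvKeep_true l hb hs]
        simp only [if_true]
        have hall : ∀ x ∈ rest.takeWhile pvKeep, x ≠ "" := by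
          intro x hx
          exact pvNe_empty_of_keep x (List.mem_takeWhile_imp hx)
        rw [ih, pvJoin_cons]
        by_cases ht : PySem.Str.join "\n" (rest.takeWhile pvKeep) = ""
        · rw [if_pos ht, if_pos ((pvJoin_eq_empty_iff _ hall).mp ht)]
        · rw [if_neg ht, if_neg (fun hn => ht (by rw [hn]; decide))]

theorem pvBlock_eq_join (lines : List String) :
    pvBlock lines = PySem.Str.join "\n" ((lines.dropWhile pvBlank).takeWhile pvKeep) := by
  induction lines with
  | nil => simp [pvBlock, PySem.Str.join, PySem.Chars.join, List.intercalate]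
  | cons l rest ih =>
    rw [pvBlock, List.dropWhile_cons]
    by_cases hb : PySem.Str.strip l = ""
    · have : pvBlank l = true := by simp [pvBlank, hb]
      rw [if_pos hb, this]
      simpa using ih
    · have hbl : pvBlank l = false := by simp [pvBlank, hb]
      rw [if_neg hb, hbl]
      simp only [Bool.false_eq_true, if_false, List.takeWhile_cons]
      by_cases hs : PySem.Str.startswith (PySem.Str.strip l) "## " = true
      · rw [if_pos hs, pvKeep_false_of_hash l hs]
        simp [PySem.Str.join, PySem.Chars.join, List.intercalate]
      · rw [if_neg hs, pvKeep_true l hb hs]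
        simp only [if_true]
        have hall : ∀ x ∈ rest.takeWhile pvKeep, x ≠ "" := by
          intro x hx
          exact pvNe_empty_of_keep x (List.mem_takeWhile_imp hx)
        rw [pvTake_eq_join, pvJoin_cons]
        by_cases ht : PySem.Str.join "\n" (rest.takeWhile pvKeep) = ""
        · rw [if_pos ht, if_pos ((pvJoin_eq_empty_iff _ hall).mp ht)]
        · rw [if_neg ht, if_neg (fun hn => ht (by rw [hn]; decide))]

-- ===== VERDICT (by name: the statement is the Claim_ definition above) =====
theorem extract_block_after_heading_py_spec : Claim_equal_extract_block_after_heading_py := by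
  intro section_ heading _
  unfold Spec_extract_block_after_heading_py
  simp only [extract_block_after_heading_py, extract_block_after_heading_py_alt]
  by_cases hneg : PySem.Str.find section_ heading < 0
  · rw [if_pos hneg, if_pos hneg]
  · rw [if_neg hneg, if_neg hneg]
    rw [pvALoop_nil, pvBlock_eq_join]
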